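-- pv_equiv track=rewrite | github.com/gthcon/streaming-log-compression | test_logs/codec_v5.py | unpack_bits
-- ===== SOURCE A (Python) =====
-- def unpack_bits(data, count, bits_per_value):
--     """Unpack bitpacked values"""
--     if not data or bits_per_value == 0 or count == 0:
--         return [0] * count
--
--     result = []
--     bit_pos = 0
--
--     for _ in range(count):
--         val = 0
--         remaining = bits_per_value
--
--         while remaining > 0:
--             byte_idx = bit_pos // 8
--             bit_offset = bit_pos % 8
--             available = 8 - bit_offset
--             take = min(available, remaining)
--
--             byte_val = data[byte_idx] if byte_idx < len(data) else 0
--             shift = available - take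
--             bits = (byte_val >> shift) & ((1 << take) - 1)
--
--             val = (val << take) | bits
--             bit_pos += take
--             remaining -= take
--
--         result.append(val)
--
--     return result
-- ===== SOURCE B (Python) =====
-- def unpack_bits(data, count, bits_per_value):
--     """Unpack bitpacked values"""
--     if not data or bits_per_value <= 0 or count == 0:
--         return [0] * count
--
--     result = []
--     buffer = 0
--     bits_in_buffer = 0
--     idx = 0
--     mask = (1 << bits_per_value) - 1
--
--     for _ in range(count):
--         while bits_in_buffer < bits_per_value:
--             byte = data[idx] & 0xFF if idx < len(data) else 0
--             buffer = (buffer << 8) | byte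
--             bits_in_buffer += 8
--             idx += 1
--         bits_in_buffer -= bits_per_value
--         result.append((buffer >> bits_in_buffer) & mask)
--         buffer &= (1 << bits_in_buffer) - 1
--
--     return result
-- ===== Notes on version B (the rewrite author's own statement) =====
-- stated objective: alternative
-- what changed: Replaces A's per-value bit-position arithmetic (byte_idx = bit_pos//8, bit-offset masks, min(available, remaining) inner loop) with a single MSB-first bit reservoir: an integer buffer topped up a whole byte at a time, each value extracted by one shift-and-mask.
import Mathlib
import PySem

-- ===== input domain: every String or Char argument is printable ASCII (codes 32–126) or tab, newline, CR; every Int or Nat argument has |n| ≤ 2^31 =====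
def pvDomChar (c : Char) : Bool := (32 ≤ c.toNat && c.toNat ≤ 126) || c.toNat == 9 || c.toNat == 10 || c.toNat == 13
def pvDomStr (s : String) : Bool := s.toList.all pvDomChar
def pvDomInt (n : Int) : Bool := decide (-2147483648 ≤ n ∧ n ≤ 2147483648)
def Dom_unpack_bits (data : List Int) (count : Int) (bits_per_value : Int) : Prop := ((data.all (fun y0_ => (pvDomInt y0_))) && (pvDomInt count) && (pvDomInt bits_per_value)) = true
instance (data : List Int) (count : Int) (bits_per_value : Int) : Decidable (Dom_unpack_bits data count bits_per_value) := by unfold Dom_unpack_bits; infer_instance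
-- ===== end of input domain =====

-- B replaces A's per-value bit-position arithmetic with an MSB-first bit reservoir
-- (whole-byte top-ups, one shift-and-mask per value): an alternative decomposition of the same job.

-- ===== PORT A =====
-- inner 'while remaining > 0' loop of A; state (val, bit_pos); returns (val, bit_pos)
def unpackChunks (data : List Int) (val bit_pos remaining : Int) : Int × Int :=
  if _h : 0 < remaining then
    let byte_idx := PySem.Int.floordiv bit_pos 8
    let bit_offset := PySem.Int.mod bit_pos 8
    let available := 8 - bit_offset
    let take := min available remaining
    -- data[byte_idx] if byte_idx < len(data) else 0   (byte_idx is never negative: bit_pos ≥ 0)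
    let byte_val := if byte_idx < PySem.List.len data then (PySem.List.pyGet? data byte_idx).getD 0 else 0
    let shift := available - take
    -- Python's '>>' '<<' on ints are Lean's '>>>' '<<<'; shift amounts are nonnegative here, so .toNat is exact
    let bits := PySem.Int.band (byte_val >>> shift.toNat) ((1 <<< take.toNat) - 1)
    unpackChunks data (PySem.Int.bor (val <<< take.toNat) bits) (bit_pos + take) (remaining - take)
  else (val, bit_pos)
termination_by remaining.toNat
decreasing_by
  have h0 := PySem.Int.mod_nonneg bit_pos (b := 8) (by norm_num)
  have h1 := PySem.Int.mod_lt bit_pos (b := 8) (by norm_num)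
  omega

-- outer 'for _ in range(count)' loop of A
def unpackLoop (data : List Int) (bits_per_value : Int) (k : Nat) (bit_pos : Int) (result : List Int) : List Int :=
  match k with
  | 0 => result
  | k + 1 =>
    let r := unpackChunks data 0 bit_pos bits_per_value
    unpackLoop data bits_per_value k r.2 (result ++ [r.1])

def unpack_bits (data : List Int) (count : Int) (bits_per_value : Int) : List Int :=
  if data = [] ∨ bits_per_value = 0 ∨ count = 0 then List.replicate count.toNat 0
  else unpackLoop data bits_per_value count.toNat 0 []

-- ===== PORT B =====
-- inner 'while bits_in_buffer < bits_per_value' top-up loop of B; returns (buffer, bits_in_buffer, idx)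
def refill (data : List Int) (bits_per_value buffer bits_in_buffer idx : Int) : Int × Int × Int :=
  if _h : bits_in_buffer < bits_per_value then
    let byte := if idx < PySem.List.len data then PySem.Int.band ((PySem.List.pyGet? data idx).getD 0) 255 else 0
    refill data bits_per_value (PySem.Int.bor (buffer <<< 8) byte) (bits_in_buffer + 8) (idx + 1)
  else (buffer, bits_in_buffer, idx)
termination_by (bits_per_value - bits_in_buffer).toNat
decreasing_by omega

-- outer 'for _ in range(count)' loop of B; state (buffer, bits_in_buffer, idx)
def altLoop (data : List Int) (bits_per_value mask : Int) (k : Nat) (buffer bits_in_buffer idx : Int) (result : List Int) : List Int :=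
  match k with
  | 0 => result
  | k + 1 =>
    let s := refill data bits_per_value buffer bits_in_buffer idx
    let m := s.2.1 - bits_per_value
    -- bits_in_buffer ≥ bits_per_value after the top-up loop, so .toNat is exact
    let val := PySem.Int.band (s.1 >>> m.toNat) mask
    altLoop data bits_per_value mask k (PySem.Int.band s.1 ((1 <<< m.toNat) - 1)) m s.2.2 (result ++ [val])

def unpack_bits_alt (data : List Int) (count : Int) (bits_per_value : Int) : List Int :=
  if data = [] ∨ bits_per_value ≤ 0 ∨ count = 0 then List.replicate count.toNat 0
  else altLoop data bits_per_value ((1 <<< bits_per_value.toNat) - 1) count.toNat 0 0 0 []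

-- ===== PRECONDITION & SPEC =====
def Spec_unpack_bits (data : List Int) (count : Int) (bits_per_value : Int) (out : List Int) : Prop := out = unpack_bits_alt data count bits_per_value
instance (data : List Int) (count : Int) (bits_per_value : Int) (out : List Int) : Decidable (Spec_unpack_bits data count bits_per_value out) := by unfold Spec_unpack_bits; infer_instance

-- ===== CLAIM (what is proved, stated in full; the proofs are below) =====
def Claim_equal_unpack_bits : Prop := ∀ (data : List Int) (count : Int) (bits_per_value : Int), Dom_unpack_bits data count bits_per_value → Spec_unpack_bits data count bits_per_value (unpack_bits data count bits_per_value)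

-- ===== LEMMAS AND PROOFS =====

-- the byte the Python programs read at byte index i: low 8 bits of data[i], 0 beyond the end
def byteN (data : List Int) (i : Nat) : Nat := ((data.getD i 0) % 256).toNat

-- bit q of the MSB-first bit stream over data
def bitN (data : List Int) (q : Nat) : Nat := byteN data (q / 8) / 2 ^ (7 - q % 8) % 2

-- the integer formed by stream bits [p, p + l), MSB first
def chunkN (data : List Int) (p : Nat) : Nat → Nat
  | 0 => 0
  | l + 1 => chunkN data p l * 2 + bitN data (p + l)

theorem byteN_lt (data : List Int) (i : Nat) : byteN data i < 256 := by
  unfold byteN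
  omega

theorem chunkN_lt (data : List Int) (p l : Nat) : chunkN data p l < 2 ^ l := by
  induction l with
  | zero => simp [chunkN]
  | succ n ih =>
    have : bitN data (p + n) < 2 := Nat.mod_lt _ (by norm_num)
    simp only [chunkN, pow_succ]
    omega

theorem chunkN_add (data : List Int) (p a b : Nat) :
    chunkN data p (a + b) = chunkN data p a * 2 ^ b + chunkN data (p + a) b := by
  induction b with
  | zero => simp [chunkN]
  | succ n ih =>
    have : a + (n + 1) = (a + n) + 1 := by omega
    rw [this]
    simp only [chunkN, ih, pow_succ]
    rw [show p + (a + n) = p + a + n from by omega]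
    ring

theorem chunkN_byte (data : List Int) (p t : Nat) (h : p % 8 + t ≤ 8) :
    chunkN data p t = byteN data (p / 8) / 2 ^ (8 - p % 8 - t) % 2 ^ t := by
  induction t with
  | zero => simp [chunkN, Nat.mod_one]
  | succ n ih =>
    have hd : (p + n) / 8 = p / 8 := by omega
    have hm : (p + n) % 8 = p % 8 + n := by omega
    have e1 : byteN data (p/8) / 2 ^ (8 - p % 8 - (n+1)) / 2 = byteN data (p/8) / 2 ^ (8 - p % 8 - n) := by
      rw [Nat.div_div_eq_div_mul, ← pow_succ]
      congr 2
      omega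
    simp only [chunkN, ih (by omega), bitN, hd, hm]
    have e2 : 7 - (p % 8 + n) = 8 - p % 8 - (n+1) := by omega
    rw [e2]
    set y := byteN data (p/8) / 2 ^ (8 - p % 8 - (n+1)) with hy
    rw [← e1, pow_succ', Nat.mod_mul]
    omega

-- central bit-arithmetic bridge: Python's (x >> s) & ((1 << t) - 1) on an arbitrary int
theorem two_pow_sub_one_cast (t : Nat) : (((2 ^ t - 1 : Nat)) : Int) = 2 ^ t - 1 := by
  have : 1 ≤ 2 ^ t := Nat.one_le_two_pow
  push_cast [this]
  ring

theorem nat_and_mask (n t : Nat) : n &&& (2 ^ t - 1) = n % 2 ^ t :=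
  Nat.and_two_pow_sub_one_eq_mod n t

theorem band_two_pow (k : Int) (t : Nat) (r : Int) (h0 : 0 ≤ r) (h1 : r < 2 ^ t) :
    PySem.Int.band (2 ^ t * k + r) ((2 : Int) ^ t - 1) = r := by
  have hp : (0 : Int) < 2 ^ t := by positivity
  have hpn : (((2 ^ t : Nat)) : Int) = 2 ^ t := by push_cast; ring
  have hmc := two_pow_sub_one_cast t
  have hmask : ((2 : Int) ^ t - 1).toNat = 2 ^ t - 1 := by omega
  unfold PySem.Int.band
  have hb : (0 : Int) ≤ 2 ^ t - 1 := by omega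
  by_cases hx : (0 : Int) ≤ 2 ^ t * k + r
  · rw [if_pos hx, if_pos hb, hmask, nat_and_mask]
    have hk : 0 ≤ k := by nlinarith
    have : ((2 ^ t * k + r).toNat % 2 ^ t : Int) = r := by
      rw [Int.toNat_of_nonneg hx]
      rw [add_comm, Int.add_mul_emod_self_left]
      exact Int.emod_eq_of_lt h0 h1
    exact_mod_cast this
  · rw [if_neg hx, if_pos hb, hmask]
    rw [Nat.and_comm, nat_and_mask]
    have h2 : (0:Int) ≤ -(2 ^ t * k + r) - 1 := by omega
    have : (((-(2 ^ t * k + r) - 1).toNat % 2 ^ t : Nat) : Int) = 2 ^ t - 1 - r := by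
      push_cast
      rw [Int.toNat_of_nonneg h2]
      rw [show -(2 ^ t * k + r) - 1 = (2 ^ t - 1 - r) + 2 ^ t * (-k - 1) from by ring,
        Int.add_mul_emod_self_left]
      exact Int.emod_eq_of_lt (by omega) (by omega)
    have hle : (-(2 ^ t * k + r) - 1).toNat % 2 ^ t ≤ 2 ^ t - 1 := by
      have := Nat.mod_lt ((-(2 ^ t * k + r) - 1).toNat) (y := 2 ^ t) (by positivity)
      omega
    omega

theorem band_shift_mask (x : Int) (s t : Nat) (hst : s + t ≤ 8) :
    PySem.Int.band (x >>> s) ((1 <<< t) - 1) = (((x % 256).toNat / 2 ^ s % 2 ^ t : Nat) : Int) := by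
  have hone : (((1 <<< t : Nat)) : Int) = 2 ^ t := by push_cast [Nat.shiftLeft_eq]; ring
  have hps : (((2 ^ s : Nat)) : Int) = 2 ^ s := by push_cast; ring
  set b : Int := x % 256 with hbdef
  have hb0 : 0 ≤ b := Int.emod_nonneg x (by norm_num)
  have hnb : b = ((b.toNat : Nat) : Int) := (Int.toNat_of_nonneg hb0).symm
  set nb : Nat := b.toNat
  have hx : x = 2 ^ s * (2 ^ (8 - s) * (x / 256)) + b := by
    have h256 : (256 : Int) = 2 ^ s * 2 ^ (8 - s) := by
      rw [← pow_add]
      norm_num [show s + (8 - s) = 8 from by omega]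
    have hdm : 256 * (x / 256) + b = x := by rw [hbdef]; omega
    rw [← mul_assoc, ← h256]
    omega
  have hdivb : b / 2 ^ s = ((nb / 2 ^ s : Nat) : Int) := by
    rw [hnb]
    rw [Int.natCast_div, hps]
  have hsplit : ((nb / 2 ^ s : Nat) : Int) = 2 ^ t * ((nb / 2 ^ s / 2 ^ t : Nat) : Int) + ((nb / 2 ^ s % 2 ^ t : Nat) : Int) := by
    have h2 : 2 ^ t * (nb / 2 ^ s / 2 ^ t) + nb / 2 ^ s % 2 ^ t = nb / 2 ^ s := by
      exact Nat.div_add_mod _ _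
    exact_mod_cast h2.symm
  have hshift : x >>> s = 2 ^ t * ((2 ^ (8 - s - t) * (x / 256)) + ((nb / 2 ^ s / 2 ^ t : Nat) : Int)) + ((nb / 2 ^ s % 2 ^ t : Nat) : Int) := by
    rw [Int.shiftRight_eq_div_pow, hps]
    conv_lhs => rw [hx]
    rw [show (2:Int) ^ s * (2 ^ (8 - s) * (x / 256)) + b = b + 2 ^ s * (2 ^ (8 - s) * (x / 256)) from by ring]
    rw [Int.add_mul_ediv_left _ _ (show (2:Int) ^ s ≠ 0 from by positivity)]
    rw [hdivb, hsplit, show (8 - s : Nat) = t + (8 - s - t) from by omega, pow_add]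
    ring_nf
    rw [show t + (8 - s - t) - t = 8 - s - t from by omega]
  rw [hone, hshift]
  exact band_two_pow _ t _ (Int.natCast_nonneg _) (by exact_mod_cast Nat.mod_lt (nb / 2 ^ s) (Nat.two_pow_pos t))

-- the byte expression both ports evaluate
theorem byte_expr (data : List Int) (i : Nat) :
    (if (i : Int) < PySem.List.len data then (PySem.List.pyGet? data (i : Int)).getD 0 else 0)
      = data.getD i 0 := by
  rw [PySem.List.len_eq, PySem.List.pyGet?_natCast]
  by_cases h : i < data.length
  · rw [if_pos (by exact_mod_cast h), List.getD_eq_getElem?_getD]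
  · rw [if_neg (by exact_mod_cast h), List.getD_eq_default _ _ (by omega)]

theorem band_mask_natCast (c t : Nat) :
    PySem.Int.band ((c : Nat) : Int) ((((1 <<< t : Nat)) : Int) - 1) = ((c % 2 ^ t : Nat) : Int) := by
  rw [show (((1 <<< t : Nat)) : Int) - 1 = ((2 ^ t - 1 : Nat) : Int) from by
    rw [two_pow_sub_one_cast]; push_cast [Nat.shiftLeft_eq]; ring]
  rw [PySem.Int.band_natCast, nat_and_mask]

theorem aInner_spec (data : List Int) (r : Nat) : ∀ (v p : Nat),
    unpackChunks data (v : Int) (p : Int) (r : Int)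
      = (((v * 2 ^ r + chunkN data p r : Nat) : Int), ((p + r : Nat) : Int)) := by
  induction r using Nat.strong_induction_on with
  | _ r ih =>
    intro v p
    rcases Nat.eq_zero_or_pos r with hr | hr
    · subst hr
      rw [unpackChunks, dif_neg (by exact_mod_cast lt_irrefl (0 : Int))]
      simp [chunkN]
    · have hoff_lt : p % 8 < 8 := Nat.mod_lt _ (by norm_num)
      set T : Nat := min (8 - p % 8) r with hT
      have hT1 : 1 ≤ T := by omega
      have hTo : T ≤ 8 - p % 8 := by omega
      have hTr : T ≤ r := by omega
      rw [unpackChunks, dif_pos (by exact_mod_cast hr)]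
      have e_idx : PySem.Int.floordiv (p : Int) 8 = ((p / 8 : Nat) : Int) := by
        exact_mod_cast PySem.Int.floordiv_natCast p 8
      have e_off : PySem.Int.mod (p : Int) 8 = ((p % 8 : Nat) : Int) := by
        exact_mod_cast PySem.Int.mod_natCast p 8
      have e_take : min ((8 : Int) - ((p % 8 : Nat) : Int)) ((r : Nat) : Int) = ((T : Nat) : Int) := by
        rw [hT]
        push_cast [Nat.cast_min]
        congr 1
        omega
      have e_shift : (((8 : Int) - ((p % 8 : Nat) : Int)) - ((T : Nat) : Int)).toNat = 8 - p % 8 - T := by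
        omega
      have e_takeN : (((T : Nat) : Int)).toNat = T := by omega
      simp only [e_idx, e_off, e_take, e_shift, e_takeN, byte_expr]
      have e_bits : PySem.Int.band ((data.getD (p / 8) 0) >>> (8 - p % 8 - T)) ((1 <<< T) - 1)
          = ((chunkN data p T : Nat) : Int) := by
        rw [band_shift_mask _ _ _ (by omega)]
        rw [chunkN_byte data p T (by omega)]
        rfl
      rw [e_bits]
      have e_val : PySem.Int.bor (((v : Nat) : Int) <<< T) ((chunkN data p T : Nat) : Int)
          = ((v * 2 ^ T + chunkN data p T : Nat) : Int) := by
        rw [show ((v : Nat) : Int) <<< T = (((v <<< T : Nat)) : Int) from by exact_mod_cast rfl]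
        rw [PySem.Int.bor_natCast]
        congr 1
        rw [Nat.shiftLeft_eq, mul_comm v (2 ^ T)]
        rw [← Nat.two_pow_add_eq_or_of_lt (chunkN_lt data p T) v]
      rw [e_val]
      have e_pos : ((p : Nat) : Int) + ((T : Nat) : Int) = (((p + T : Nat)) : Int) := by push_cast; ring
      have e_rem : ((r : Nat) : Int) - ((T : Nat) : Int) = (((r - T : Nat)) : Int) := by omega
      rw [e_pos, e_rem, ih (r - T) (by omega)]
      rw [Prod.mk.injEq]
      have hch : chunkN data p r = chunkN data p T * 2 ^ (r - T) + chunkN data (p + T) (r - T) := by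
        have h := chunkN_add data p T (r - T)
        rwa [show T + (r - T) = r from by omega] at h
      constructor
      · congr 1
        have hpow : (2 : Nat) ^ T * 2 ^ (r - T) = 2 ^ r := by
          rw [← pow_add]
          congr 1
          omega
        rw [hch, show (v * 2 ^ T + chunkN data p T) * 2 ^ (r - T)
            = v * (2 ^ T * 2 ^ (r - T)) + chunkN data p T * 2 ^ (r - T) from by ring, hpow]
        ring
      · congr 1
        omega

theorem refill_spec (data : List Int) (bpv : Nat) : ∀ (m p idx : Nat), 8 * idx = p + m →
    ∃ M idx', bpv ≤ M ∧ 8 * idx' = p + M ∧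
      refill data (bpv : Int) ((chunkN data p m : Nat) : Int) (m : Int) (idx : Int)
        = (((chunkN data p M : Nat) : Int), (M : Int), (idx' : Int)) := by
  have band255 : ∀ x : Int, PySem.Int.band x 255 = (((x % 256).toNat : Nat) : Int) := by
    intro x
    have h := band_shift_mask x 0 8 (by norm_num)
    have h0 : x >>> (0 : Nat) = x := by
      rw [Int.shiftRight_eq_div_pow]
      norm_num
    rw [h0, show (((1 <<< 8 : Nat)) : Int) - 1 = 255 from by norm_num [Nat.shiftLeft_eq]] at h
    rw [h]
    congr 1
    rw [Nat.pow_zero, Nat.div_one, Nat.mod_eq_of_lt]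
    have h1 := Int.emod_nonneg x (show (256:Int) ≠ 0 from by norm_num)
    have h2 := Int.emod_lt_of_pos x (show (0:Int) < 256 from by norm_num)
    omega
  suffices key : ∀ (k m p idx : Nat), bpv - m ≤ k → 8 * idx = p + m →
      ∃ M idx', bpv ≤ M ∧ 8 * idx' = p + M ∧
        refill data (bpv : Int) ((chunkN data p m : Nat) : Int) (m : Int) (idx : Int)
          = (((chunkN data p M : Nat) : Int), (M : Int), (idx' : Int)) by
    intro m p idx h8
    exact key (bpv - m) m p idx le_rfl h8
  intro k
  induction k with
  | zero =>
    intro m p idx hk h8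
    refine ⟨m, idx, by omega, h8, ?_⟩
    rw [refill, dif_neg (show ¬ ((m : Nat) : Int) < ((bpv : Nat) : Int) from by exact_mod_cast by omega)]
  | succ k ih =>
    intro m p idx hk h8
    by_cases hm : m < bpv
    · rw [refill, dif_pos (show ((m : Nat) : Int) < ((bpv : Nat) : Int) from by exact_mod_cast hm)]
      have e_byte : (if (idx : Int) < PySem.List.len data
            then PySem.Int.band ((PySem.List.pyGet? data (idx : Int)).getD 0) 255 else 0)
          = ((byteN data idx : Nat) : Int) := by
        rw [PySem.List.len_eq, PySem.List.pyGet?_natCast]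
        by_cases h : idx < data.length
        · rw [if_pos (by exact_mod_cast h), band255]
          unfold byteN
          rw [List.getD_eq_getElem?_getD]
        · rw [if_neg (by exact_mod_cast h)]
          unfold byteN
          rw [List.getD_eq_default _ _ (by omega)]
          norm_num
      have e_buf : PySem.Int.bor (((chunkN data p m : Nat) : Int) <<< (8 : Int)) ((byteN data idx : Nat) : Int)
          = ((chunkN data p (m + 8) : Nat) : Int) := by
        have hmod : (p + m) % 8 = 0 := by omega
        have hdiv : (p + m) / 8 = idx := by omega
        have h58 : chunkN data (p + m) 8 = byteN data idx := by
          rw [chunkN_byte data (p + m) 8 (by omega), hmod, hdiv]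
          norm_num
          exact byteN_lt data idx
        rw [show (8 : Int) = ((8 : Nat) : Int) from rfl, Int.shiftLeft_natCast, PySem.Int.bor_natCast]
        congr 1
        rw [Nat.shiftLeft_eq, mul_comm (chunkN data p m) (2 ^ 8)]
        rw [← Nat.two_pow_add_eq_or_of_lt (byteN_lt data idx) (chunkN data p m)]
        rw [chunkN_add data p m 8, h58]
        ring
      have e_m8 : ((m : Nat) : Int) + 8 = (((m + 8 : Nat)) : Int) := by push_cast; ring
      have e_i1 : ((idx : Nat) : Int) + 1 = (((idx + 1 : Nat)) : Int) := by push_cast; ring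
      simp only [e_byte, e_buf, e_m8, e_i1]
      exact ih (m + 8) p (idx + 1) (by omega) (by omega)
    · refine ⟨m, idx, by omega, h8, ?_⟩
      rw [refill, dif_neg (show ¬ ((m : Nat) : Int) < ((bpv : Nat) : Int) from by exact_mod_cast by omega)]

theorem loops_eq (data : List Int) (bpv : Nat) (k : Nat) :
    ∀ (p m idx : Nat) (acc : List Int), 8 * idx = p + m →
    unpackLoop data (bpv : Int) k (p : Int) acc
      = altLoop data (bpv : Int) ((1 <<< ((bpv : Int)).toNat) - 1) k ((chunkN data p m : Nat) : Int) (m : Int) (idx : Int) acc := by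
  induction k with
  | zero => intro p m idx acc h8; simp [unpackLoop, altLoop]
  | succ k ih =>
    intro p m idx acc h8
    simp only [unpackLoop, altLoop]
    obtain ⟨M, idx', hM, h8', hfill⟩ := refill_spec data bpv m p idx h8
    have hA : unpackChunks data 0 ((p : Nat) : Int) ((bpv : Nat) : Int)
        = (((chunkN data p bpv : Nat) : Int), (((p + bpv : Nat)) : Int)) := by
      have h := aInner_spec data bpv 0 p
      simpa using h
    have hsplitM : chunkN data p M = chunkN data p bpv * 2 ^ (M - bpv) + chunkN data (p + bpv) (M - bpv) := by
      have h := chunkN_add data p bpv (M - bpv)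
      rwa [show bpv + (M - bpv) = M from by omega] at h
    have e_m' : ((M : Nat) : Int) - ((bpv : Nat) : Int) = ((M - bpv : Nat) : Int) := by omega
    have e_toNat : (((M - bpv : Nat) : Int)).toNat = M - bpv := by omega
    have e_shift : ((chunkN data p M : Nat) : Int) >>> (M - bpv) = ((chunkN data p bpv : Nat) : Int) := by
      rw [show ((chunkN data p M : Nat) : Int) >>> (M - bpv) = ((chunkN data p M >>> (M - bpv) : Nat) : Int)
        from by exact_mod_cast rfl]
      congr 1
      rw [Nat.shiftRight_eq_div_pow, hsplitM]
      rw [add_comm, Nat.add_mul_div_right _ _ (Nat.two_pow_pos _),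
        Nat.div_eq_of_lt (chunkN_lt data (p + bpv) (M - bpv)), Nat.zero_add]
    have e_val : PySem.Int.band (((chunkN data p bpv : Nat) : Int)) ((((1 <<< bpv : Nat)) : Int) - 1)
        = ((chunkN data p bpv : Nat) : Int) := by
      rw [band_mask_natCast, Nat.mod_eq_of_lt (chunkN_lt data p bpv)]
    have e_buf : PySem.Int.band (((chunkN data p M : Nat) : Int)) ((((1 <<< (M - bpv) : Nat)) : Int) - 1)
        = ((chunkN data (p + bpv) (M - bpv) : Nat) : Int) := by
      rw [band_mask_natCast]
      congr 1
      rw [hsplitM, Nat.mul_add_mod']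
      exact Nat.mod_eq_of_lt (chunkN_lt data (p + bpv) (M - bpv))
    simp only [hA, hfill, Int.toNat_natCast, e_m', e_toNat, e_shift, e_val, e_buf]
    exact ih (p + bpv) (M - bpv) idx' _ (by omega)

theorem negLoop (data : List Int) (bpv : Int) (hb : bpv ≤ 0) (k : Nat) :
    ∀ (bp : Int) (acc : List Int), unpackLoop data bpv k bp acc = acc ++ List.replicate k 0 := by
  induction k with
  | zero => intro bp acc; simp [unpackLoop]
  | succ k ih =>
    intro bp acc
    simp only [unpackLoop]
    rw [unpackChunks, dif_neg (by omega : ¬ (0 : Int) < bpv)]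
    rw [ih]
    simp [List.replicate_succ]

-- ===== VERDICT (by name: the statement is the Claim_ definition above) =====
theorem unpack_bits_spec : Claim_equal_unpack_bits := by
  intro data count bits_per_value _
  unfold Spec_unpack_bits unpack_bits unpack_bits_alt
  by_cases hd : data = []
  · simp [hd]
  · by_cases hc : count = 0
    · simp [hd, hc]
    · by_cases hbz : bits_per_value = 0
      · simp [hd, hc, hbz]
      · by_cases hbn : bits_per_value ≤ 0
        · rw [if_neg (by tauto), if_pos (by tauto)]
          rw [negLoop data bits_per_value (by omega) count.toNat 0 []]
          simp
        · rw [if_neg (by tauto), if_neg (by simp only [not_or]; exact ⟨hd, by omega, hc⟩)]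
          have hcast : ((bits_per_value.toNat : Nat) : Int) = bits_per_value :=
            Int.toNat_of_nonneg (by omega)
          have h := loops_eq data bits_per_value.toNat count.toNat 0 0 0 [] (by omega)
          rw [hcast] at h
          simpa [chunkN] using h
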